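-- pv_equiv track=rewrite | github.com/hsgser/clafusion | align_layers.py | transfer_to_align_map
-- ===== SOURCE A (Python) =====
-- def transfer_to_align_map(mapping, model_type):
--     """Align map index starts from 1"""
--     assert mapping == sorted(mapping)
--     if model_type != "resnet":
--         return [idx + 1 for idx in mapping]
--
--     new_mapping = []
--
--     for idx in mapping:
--         if idx > 28:
--             new_mapping.append(idx + 4)
--         elif idx > 16:
--             new_mapping.append(idx + 3)
--         elif idx > 8:
--             new_mapping.append(idx + 2)
--         else:
--             new_mapping.append(idx + 1)
--
--     new_mapping.extend([10, 19, 32])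
--
--     return sorted(new_mapping)
-- ===== SOURCE B (Python) =====
-- def transfer_to_align_map(mapping, model_type):
--     """Align map index starts from 1"""
--     assert mapping == sorted(mapping)
--     if model_type != "resnet":
--         return [idx + 1 for idx in mapping]
--
--     def off(idx):
--         if idx > 28:
--             return idx + 4
--         if idx > 16:
--             return idx + 3
--         if idx > 8:
--             return idx + 2
--         return idx + 1
--
--     # off is monotone and mapping is sorted, so shifted is already sorted.
--     shifted = [off(idx) for idx in mapping]
--
--     # Merge the sorted list with the sorted constants [10, 19, 32] in one pass
--     # instead of appending and re-sorting.
--     consts = [10, 19, 32]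
--     out = []
--     i = j = 0
--     while i < len(shifted) and j < len(consts):
--         if shifted[i] <= consts[j]:
--             out.append(shifted[i])
--             i += 1
--         else:
--             out.append(consts[j])
--             j += 1
--     out.extend(shifted[i:])
--     out.extend(consts[j:])
--     return out
-- ===== Notes on version B (the rewrite author's own statement) =====
-- stated objective: alternative
-- what changed: For resnet, B exploits that the offset map is monotone, so the transformed list is already sorted, and merges it with the sorted constants [10,19,32] in a single linear pass instead of appending them and re-sorting the whole list.
import Mathlib
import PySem

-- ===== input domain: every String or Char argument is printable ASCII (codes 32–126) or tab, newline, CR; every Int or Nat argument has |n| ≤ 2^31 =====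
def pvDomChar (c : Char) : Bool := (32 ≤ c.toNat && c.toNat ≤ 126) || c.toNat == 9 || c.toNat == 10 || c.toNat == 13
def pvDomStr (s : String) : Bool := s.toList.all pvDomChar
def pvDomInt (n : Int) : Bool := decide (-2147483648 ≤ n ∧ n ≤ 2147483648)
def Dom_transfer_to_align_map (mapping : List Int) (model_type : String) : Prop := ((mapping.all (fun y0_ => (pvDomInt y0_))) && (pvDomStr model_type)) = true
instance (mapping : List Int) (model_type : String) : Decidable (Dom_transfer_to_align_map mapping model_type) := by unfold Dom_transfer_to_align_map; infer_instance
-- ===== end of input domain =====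

-- ===== PORT A =====
-- B changes only the resnet branch: the shifted list is already sorted, so B merges
-- it with the sorted constants in one pass instead of appending and re-sorting.
-- The Python assert (mapping == sorted(mapping)) raises AssertionError on unsorted
-- input; Pre_ excludes exactly those inputs, so both ports omit the assert.
def transfer_to_align_map (mapping : List Int) (model_type : String) : List Int :=
  if model_type ≠ "resnet" then
    mapping.map (fun idx => idx + 1)
  else
    let new_mapping := mapping.foldl (fun acc idx =>
      acc ++ [if idx > 28 then idx + 4
              else if idx > 16 then idx + 3
              else if idx > 8 then idx + 2
              else idx + 1]) []
    PySem.List.sorted (new_mapping ++ [10, 19, 32]) (fun x => x) false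

-- ===== PORT B =====
def pvOff (idx : Int) : Int :=
  if idx > 28 then idx + 4
  else if idx > 16 then idx + 3
  else if idx > 8 then idx + 2
  else idx + 1

-- the one-pass merge loop of Source B (recursion on the two list suffixes = the index pair i, j)
def pvMerge : List Int → List Int → List Int
  | [], ys => ys
  | x :: xs, [] => x :: xs
  | x :: xs, y :: ys =>
    if x ≤ y then x :: pvMerge xs (y :: ys)
    else y :: pvMerge (x :: xs) ys

def transfer_to_align_map_alt (mapping : List Int) (model_type : String) : List Int :=
  if model_type ≠ "resnet" then
    mapping.map (fun idx => idx + 1)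
  else
    let shifted := mapping.map pvOff
    pvMerge shifted [10, 19, 32]

-- ===== PRECONDITION & SPEC =====
-- A's assert raises AssertionError unless mapping == sorted(mapping); Pre_ admits exactly the sorted lists.
def Pre_transfer_to_align_map (mapping : List Int) (model_type : String) : Prop :=
  mapping.Pairwise (· ≤ ·)
instance (mapping : List Int) (model_type : String) : Decidable (Pre_transfer_to_align_map mapping model_type) := by unfold Pre_transfer_to_align_map; infer_instance
def pvWitness_transfer_to_align_map : List Int × String := ([1, 5, 30], "resnet")
def Spec_transfer_to_align_map (mapping : List Int) (model_type : String) (out : List Int) : Prop := out = transfer_to_align_map_alt mapping model_type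
instance (mapping : List Int) (model_type : String) (out : List Int) : Decidable (Spec_transfer_to_align_map mapping model_type out) := by unfold Spec_transfer_to_align_map; infer_instance

-- ===== CLAIM (what is proved, stated in full; the proofs are below) =====
def Claim_equal_transfer_to_align_map : Prop := ∀ (mapping : List Int) (model_type : String), Dom_transfer_to_align_map mapping model_type → Pre_transfer_to_align_map mapping model_type → Spec_transfer_to_align_map mapping model_type (transfer_to_align_map mapping model_type)

-- ===== LEMMAS AND PROOFS =====

lemma pvMerge_perm : ∀ (xs ys : List Int), (pvMerge xs ys).Perm (xs ++ ys)
  | [], ys => by simp [pvMerge]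
  | x :: xs, [] => by simp [pvMerge]
  | x :: xs, y :: ys => by
    rw [pvMerge]
    split_ifs with h
    · exact (pvMerge_perm xs (y :: ys)).cons x
    · exact ((pvMerge_perm (x :: xs) ys).cons y).trans List.perm_middle.symm

lemma mem_pvMerge {z : Int} : ∀ {xs ys : List Int}, z ∈ pvMerge xs ys → z ∈ xs ++ ys :=
  fun {xs ys} h => (pvMerge_perm xs ys).mem_iff.mp h

lemma pvMerge_pairwise : ∀ (xs ys : List Int), xs.Pairwise (· ≤ ·) → ys.Pairwise (· ≤ ·) →
    (pvMerge xs ys).Pairwise (· ≤ ·)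
  | [], ys, _, hys => by simpa [pvMerge] using hys
  | x :: xs, [], hxs, _ => by simpa [pvMerge] using hxs
  | x :: xs, y :: ys, hxs, hys => by
    rw [pvMerge]
    rcases List.pairwise_cons.mp hxs with ⟨hx, hxs'⟩
    rcases List.pairwise_cons.mp hys with ⟨hy, hys'⟩
    split_ifs with h
    · refine List.pairwise_cons.mpr ⟨?_, pvMerge_pairwise xs (y :: ys) hxs' hys⟩
      intro z hz
      rcases List.mem_append.mp (mem_pvMerge hz) with hz | hz
      · exact hx z hz
      · rcases List.mem_cons.mp hz with rfl | hz
        · exact h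
        · exact le_trans h (hy z hz)
    · refine List.pairwise_cons.mpr ⟨?_, pvMerge_pairwise (x :: xs) ys hxs hys'⟩
      intro z hz
      rcases List.mem_append.mp (mem_pvMerge hz) with hz | hz
      · rcases List.mem_cons.mp hz with rfl | hz
        · omega
        · exact le_trans (by omega) (hx z hz)
      · exact hy z hz

lemma pvOff_mono {a b : Int} (h : a ≤ b) : pvOff a ≤ pvOff b := by
  unfold pvOff; split_ifs <;> omega

-- ===== VERDICT (by name: the statement is the Claim_ definition above) =====
theorem transfer_to_align_map_spec : Claim_equal_transfer_to_align_map := by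
  intro mapping model_type _ hpre
  unfold Spec_transfer_to_align_map transfer_to_align_map transfer_to_align_map_alt
  split_ifs with h
  · rfl
  · have hfold : mapping.foldl (fun acc idx =>
        acc ++ [if idx > 28 then idx + 4
                else if idx > 16 then idx + 3
                else if idx > 8 then idx + 2
                else idx + 1]) [] = mapping.map pvOff := by
      simpa [pvOff] using PySem.List.foldl_append_singleton_eq_map
        (fun idx : Int => if idx > 28 then idx + 4
                else if idx > 16 then idx + 3
                else if idx > 8 then idx + 2
                else idx + 1) mapping []
    rw [hfold]
    have hshift : (mapping.map pvOff).Pairwise (· ≤ ·) := by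
      rw [List.pairwise_map]
      exact hpre.imp (fun hab => pvOff_mono hab)
    have hconst : ([10, 19, 32] : List Int).Pairwise (· ≤ ·) := by decide
    exact PySem.List.sorted_id_eq_of_perm_of_pairwise _ _
      (pvMerge_perm (mapping.map pvOff) [10, 19, 32])
      (pvMerge_pairwise _ _ hshift hconst)
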